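-- pv_equiv track=rewrite | github.com/dallasmcgroarty/python | pract.py | numPairs
-- ===== SOURCE A (Python) =====
-- def numPairs(ar):
--     pairs = 0
--     seen = set()
--     for i in range(0, len(ar)):
--         if ar[i] in seen:
--             continue
--         numCopies = ar.count(ar[i])
--         seen.add(ar[i])
--         if numCopies % 2 == 0 and numCopies >= 2:
--             pairs += numCopies // 2
--         elif numCopies % 2 == 1 and numCopies > 2:
--             pairs += (numCopies - 1) // 2
--     print (seen)
--     return pairs
-- ===== SOURCE B (Python) =====
-- def numPairs(ar):
--     pairs = 0
--     counts = {}
--     for x in ar: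
--         c = counts.get(x, 0) + 1
--         counts[x] = c
--         if c % 2 == 0:
--             pairs += 1
--     print(set(ar))
--     return pairs
-- ===== Notes on version B (the rewrite author's own statement) =====
-- stated objective: faster
-- what changed: Replaces the quadratic seen-set loop that calls ar.count on each first occurrence with a single pass over a running-count dict, incrementing pairs whenever an element's running count turns even (no total counts, no floor division).
import Mathlib
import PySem

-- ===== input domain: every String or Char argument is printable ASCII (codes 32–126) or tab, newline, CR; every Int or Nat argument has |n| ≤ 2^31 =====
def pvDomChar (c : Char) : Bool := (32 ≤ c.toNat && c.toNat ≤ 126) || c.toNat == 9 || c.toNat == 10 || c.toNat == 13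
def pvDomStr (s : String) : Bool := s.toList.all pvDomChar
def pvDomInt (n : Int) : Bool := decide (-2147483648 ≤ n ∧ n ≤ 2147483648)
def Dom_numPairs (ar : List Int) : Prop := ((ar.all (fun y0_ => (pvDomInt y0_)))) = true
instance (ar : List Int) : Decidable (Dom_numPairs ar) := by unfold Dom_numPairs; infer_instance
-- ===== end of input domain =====

-- B replaces A's quadratic seen-set/ar.count loop with one linear pass over a running-count
-- dict, incrementing pairs whenever a count turns even. Both Pythons print a set of ar's
-- elements as a side effect; the equivalence proved here is about the RETURN value only.

-- ===== PORT A =====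
def numPairsStepA (ar : List Int) (st : Int × PySem.Set Int) (x : Int) : Int × PySem.Set Int :=
  if PySem.Set.contains st.2 x then st
  else
    let numCopies : Int := (PySem.List.count ar x : Int)
    let seen := PySem.Set.add st.2 x
    if PySem.Int.mod numCopies 2 = 0 ∧ numCopies ≥ 2 then
      (st.1 + PySem.Int.floordiv numCopies 2, seen)
    else if PySem.Int.mod numCopies 2 = 1 ∧ numCopies > 2 then
      (st.1 + PySem.Int.floordiv (numCopies - 1) 2, seen)
    else (st.1, seen)

def numPairs (ar : List Int) : Int :=
  ((PySem.List.pyRange 0 (PySem.List.len ar) 1).foldl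
    (fun st i => numPairsStepA ar st (PySem.List.pyGetD ar i 0))
    ((0 : Int), (PySem.Set.empty : PySem.Set Int))).1

-- ===== PORT B =====
def numPairsStepB (st : Int × PySem.Dict Int Int) (x : Int) : Int × PySem.Dict Int Int :=
  let c := st.2.getD x 0 + 1
  ((if PySem.Int.mod c 2 = 0 then st.1 + 1 else st.1), st.2.insert x c)

def numPairs_alt (ar : List Int) : Int :=
  (ar.foldl numPairsStepB ((0 : Int), (PySem.Dict.empty : PySem.Dict Int Int))).1

-- ===== PRECONDITION & SPEC =====
def Spec_numPairs (ar : List Int) (out : Int) : Prop := out = numPairs_alt ar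
instance (ar : List Int) (out : Int) : Decidable (Spec_numPairs ar out) := by unfold Spec_numPairs; infer_instance

-- ===== CLAIM (what is proved, stated in full; the proofs are below) =====
def Claim_equal_numPairs : Prop := ∀ (ar : List Int), Dom_numPairs ar → Spec_numPairs ar (numPairs ar)

-- ===== LEMMAS AND PROOFS =====

-- pairs contributed by a set of values, counting occurrences within m
def pvG (m : List Int) (s : PySem.Set Int) : Int :=
  (s.map (fun y => ((List.count y m / 2 : Nat) : Int))).sum

-- the common value of both programs: Σ over the distinct values of ⌊count/2⌋
def pvGG (m : List Int) : Int := pvG m (PySem.Set.ofList m)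

-- sums over a nodup list of two maps that differ only at one member
lemma sum_map_single_diff (S : List Int) (f f' : Int → Int) (x : Int)
    (hS : S.Nodup) (hx : x ∈ S) (h : ∀ y ∈ S, y ≠ x → f y = f' y) :
    (S.map f).sum = (S.map f').sum + (f x - f' x) := by
  induction S with
  | nil => cases hx
  | cons a S ih =>
    simp only [List.map_cons, List.sum_cons]
    rcases List.mem_cons.mp hx with rfl | hx'
    · have hnot : x ∉ S := (List.nodup_cons.mp hS).1
      have hmap : S.map f = S.map f' :=
        List.map_congr_left (fun y hy => h y (List.mem_cons_of_mem _ hy) (fun e => hnot (e ▸ hy)))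
      rw [hmap]; ring
    · have ha : a ≠ x := fun e => (List.nodup_cons.mp hS).1 (e ▸ hx')
      rw [h a (List.mem_cons_self) ha,
        ih (List.nodup_cons.mp hS).2 hx' (fun y hy hne => h y (List.mem_cons_of_mem _ hy) hne)]
      ring

-- appending one element raises the pair total by 1 exactly when its count turns even
lemma gg_append (m : List Int) (x : Int) :
    pvGG (m ++ [x]) = pvGG m + (if (List.count x m + 1) % 2 = 0 then 1 else 0) := by
  have hof : PySem.Set.ofList (m ++ [x]) = PySem.Set.add (PySem.Set.ofList m) x := by
    rw [PySem.Set.ofList_eq_foldl, PySem.Set.ofList_eq_foldl, List.foldl_append]; rfl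
  by_cases hx : x ∈ m
  · have hmem : x ∈ PySem.Set.ofList m := (PySem.Set.mem_ofList m x).mpr hx
    have hadd : PySem.Set.add (PySem.Set.ofList m) x = PySem.Set.ofList m := by
      simp [PySem.Set.add, hmem]
    unfold pvGG pvG
    rw [hof, hadd]
    rw [sum_map_single_diff (PySem.Set.ofList m) _ (fun y => ((List.count y m / 2 : Nat) : Int)) x
      (PySem.Set.nodup_ofList m) hmem
      (fun y _ hne => by
        have : List.count y (m ++ [x]) = List.count y m := by
          simp [List.count_append, Ne.symm hne]
        rw [this])]
    have hcx : List.count x (m ++ [x]) = List.count x m + 1 := by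
      simp [List.count_append]
    rw [hcx]
    set c := List.count x m
    split_ifs with he
    · have : (c + 1) / 2 = c / 2 + 1 := by omega
      rw [this]; push_cast; ring
    · have : (c + 1) / 2 = c / 2 := by omega
      rw [this]; push_cast; ring
  · have hmem : x ∉ PySem.Set.ofList m := fun h => hx ((PySem.Set.mem_ofList m x).mp h)
    have hadd : PySem.Set.add (PySem.Set.ofList m) x = PySem.Set.ofList m ++ [x] := by
      simp [PySem.Set.add, hmem]
    unfold pvGG pvG
    rw [hof, hadd, List.map_append, List.sum_append]
    have hc0 : List.count x m = 0 := List.count_eq_zero_of_not_mem hx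
    have hmap : (PySem.Set.ofList m).map (fun y => ((List.count y (m ++ [x]) / 2 : Nat) : Int))
        = (PySem.Set.ofList m).map (fun y => ((List.count y m / 2 : Nat) : Int)) := by
      refine List.map_congr_left (fun y hy => ?_)
      have hne : y ≠ x := fun e => hmem (e ▸ hy)
      simp [List.count_append, Ne.symm hne]
    rw [hmap]
    simp [hc0]

-- A's step adds ⌊count/2⌋ on a first occurrence, nothing on a repeat
lemma stepA_eq (ar : List Int) (st : Int × PySem.Set Int) (x : Int) :
    numPairsStepA ar st x =
      if PySem.Set.contains st.2 x then st
      else (st.1 + ((List.count x ar / 2 : Nat) : Int), PySem.Set.add st.2 x) := by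
  unfold numPairsStepA
  by_cases h : PySem.Set.contains st.2 x
  · rw [if_pos h, if_pos h]
  · rw [if_neg h, if_neg h]
    simp only [PySem.List.count_eq]
    set c := List.count x ar with hc
    have hmod : PySem.Int.mod (c : Int) 2 = ((c % 2 : Nat) : Int) := by
      exact_mod_cast PySem.Int.mod_natCast c 2
    have hdiv : PySem.Int.floordiv (c : Int) 2 = ((c / 2 : Nat) : Int) := by
      exact_mod_cast PySem.Int.floordiv_natCast c 2
    split_ifs with h1 h2
    · rw [hdiv]
    · obtain ⟨ho, hgt⟩ := h2
      rw [hmod] at ho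
      have ho' : c % 2 = 1 := by exact_mod_cast ho
      have hgt' : 2 < c := by exact_mod_cast hgt
      have h1 : (c : Int) - 1 = ((c - 1 : Nat) : Int) := by omega
      rw [h1]
      have hdiv1 : PySem.Int.floordiv ((c - 1 : Nat) : Int) 2 = (((c - 1) / 2 : Nat) : Int) := by
        exact_mod_cast PySem.Int.floordiv_natCast (c - 1) 2
      rw [hdiv1]
      have : (c - 1) / 2 = c / 2 := by omega
      rw [this]
    · rw [hmod] at h1 h2
      have hz : c / 2 = 0 := by
        rcases Nat.even_or_odd c with he | ho
        · have : (c : Int) < 2 := by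
            by_contra hge
            exact h1 ⟨by exact_mod_cast (Nat.even_iff.mp he), by omega⟩
          have : c < 2 := by exact_mod_cast this
          omega
        · have hco : c % 2 = 1 := Nat.odd_iff.mp ho
          have : ¬ (c : Int) > 2 := by
            intro hgt
            exact h2 ⟨by exact_mod_cast hco, hgt⟩
          have : c ≤ 2 := by omega
          omega
      rw [hz]
      simp

-- A's loop invariant: pairs grows by the contributions of the values newly entering seen
lemma lemA (ar : List Int) : ∀ (l : List Int) (s : PySem.Set Int) (p : Int),
    l.foldl (numPairsStepA ar) (p, s) =
      (p + pvG ar (PySem.Set.update s l) - pvG ar s, PySem.Set.update s l) := by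
  intro l
  induction l with
  | nil => intro s p; show (p, s) = _; show _ = (p + pvG ar s - pvG ar s, s); ring_nf
  | cons x l ih =>
    intro s p
    rw [List.foldl_cons, stepA_eq]
    have hupd : PySem.Set.update s (x :: l) = PySem.Set.update (PySem.Set.add s x) l := rfl
    by_cases h : PySem.Set.contains s x
    · have hadd : PySem.Set.add s x = s := by
        simp [PySem.Set.add, (PySem.Set.contains_iff s x).mp h]
      rw [if_pos h, hupd, hadd, ih]
    · have hmem : x ∉ s := fun hm => h ((PySem.Set.contains_iff s x).mpr hm)
      have hadd : PySem.Set.add s x = s ++ [x] := by simp [PySem.Set.add, hmem]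
      have hG : pvG ar (PySem.Set.add s x) = pvG ar s + ((List.count x ar / 2 : Nat) : Int) := by
        rw [hadd]; unfold pvG; rw [List.map_append, List.sum_append]; simp
      rw [if_neg h, ih, hG, hupd]
      simp only [Prod.mk.injEq]
      exact ⟨by ring, trivial⟩

-- B's loop invariant, with its dict written as the insert-fold of the processed prefix
lemma lemB : ∀ (l pre : List Int) (p : Int),
    (l.foldl numPairsStepB
      (p, pre.foldl (fun d x => d.insert x (d.getD x 0 + 1)) PySem.Dict.empty)).1
      = p + pvGG (pre ++ l) - pvGG pre := by
  intro l
  induction l with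
  | nil => intro pre p; simp
  | cons x l ih =>
    intro pre p
    rw [List.foldl_cons]
    have hcnt : (pre.foldl (fun d x => d.insert x (d.getD x 0 + 1)) PySem.Dict.empty).getD x 0
        = (List.count x pre : Int) := by
      rw [PySem.Dict.foldl_insert_getD_add_one_eq_counter, PySem.Dict.getD_counter]
    have hstep : numPairsStepB
        (p, pre.foldl (fun d x => d.insert x (d.getD x 0 + 1)) PySem.Dict.empty) x
        = ((if (List.count x pre + 1) % 2 = 0 then p + 1 else p),
           (pre ++ [x]).foldl (fun d x => d.insert x (d.getD x 0 + 1)) PySem.Dict.empty) := by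
      unfold numPairsStepB
      rw [List.foldl_append]
      simp only [List.foldl_cons, List.foldl_nil, hcnt]
      congr 1
      have hm : PySem.Int.mod ((List.count x pre : Int) + 1) 2
          = (((List.count x pre + 1) % 2 : Nat) : Int) := by
        exact_mod_cast PySem.Int.mod_natCast (List.count x pre + 1) 2
      rw [hm]
      by_cases he : (List.count x pre + 1) % 2 = 0
      · rw [if_pos he, if_pos (by exact_mod_cast congrArg (Nat.cast : Nat → Int) he)]
      · rw [if_neg he, if_neg (by exact_mod_cast fun h => he (by exact_mod_cast h))]
    rw [hstep, ih (pre ++ [x])]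
    rw [gg_append]
    have hassoc : pre ++ [x] ++ l = pre ++ x :: l := by simp
    rw [hassoc]
    split_ifs with he <;> ring

lemma numPairs_eq (ar : List Int) : numPairs ar = pvGG ar := by
  unfold numPairs
  rw [PySem.List.foldl_pyRange_pyGetD ar 0 (numPairsStepA ar) _ (le_refl 0)]
  rw [Int.toNat_zero, List.drop_zero, lemA]
  show 0 + pvG ar (PySem.Set.update [] ar) - pvG ar [] = _
  rw [show PySem.Set.update ([] : PySem.Set Int) ar = PySem.Set.ofList ar from
    (PySem.Set.ofList_eq_foldl ar).symm]
  unfold pvGG pvG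
  simp

lemma numPairs_alt_eq (ar : List Int) : numPairs_alt ar = pvGG ar := by
  unfold numPairs_alt
  have := lemB ar [] 0
  simp only [List.foldl_nil, List.nil_append] at this
  rw [this]
  unfold pvGG pvG
  simp

-- ===== VERDICT (by name: the statement is the Claim_ definition above) =====
theorem numPairs_spec : Claim_equal_numPairs := by
  intro ar _
  unfold Spec_numPairs
  rw [numPairs_eq, numPairs_alt_eq]
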